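-- pv_equiv track=rewrite | github.com/thedevstyx/RL-Algo | helper.py | extract_view
-- ===== SOURCE A (Python) =====
-- def extract_view(maze, player_pos, size=4):
--     view_range = size // 2  # Half the size for the square area
--     player_row, player_col = player_pos
--
--     maze_height = len(maze)
--     maze_width = len(maze[0])
--
--     # Determine the slicing boundaries
--     start_row = max(player_row - view_range, 0)
--     end_row = min(player_row + view_range, maze_height - 1) + 1
--     start_col = max(player_col - view_range, 0)
--     end_col = min(player_col + view_range, maze_width - 1) + 1
--
--     # Extract the sliced grid
--     sliced_view = [row[start_col:end_col] for row in maze[start_row:end_row]]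
--
--     # Add padding if necessary to ensure 4x4 size
--     while len(sliced_view) < size:  # Pad rows to make it 4x4
--         if start_row == 0:  # Add empty rows at the bottom if near the top edge
--             sliced_view.append(['#'] * len(sliced_view[0]))
--         else:  # Add empty rows at the top if near the bottom edge
--             sliced_view.insert(0, ['#'] * len(sliced_view[0]))
--
--     for row in sliced_view:  # Pad columns in each row
--         while len(row) < size:
--             if start_col == 0:  # Add walls to the right if near the left edge
--                 row.append('#')
--             else:  # Add walls to the left if near the right edge
--                 row.insert(0, '#')
--
--     return sliced_view
-- ===== SOURCE B (Python) =====
-- def extract_view(maze, player_pos, size=4):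
--     view_range = size // 2
--     player_row, player_col = player_pos
--
--     maze_height = len(maze)
--     maze_width = len(maze[0])
--
--     start_row = max(player_row - view_range, 0)
--     end_row = min(player_row + view_range, maze_height - 1) + 1
--     start_col = max(player_col - view_range, 0)
--     end_col = min(player_col + view_range, maze_width - 1) + 1
--
--     nrows = end_row - start_row
--     out_rows = max(nrows, size)
--     pad_top = out_rows - nrows if start_row != 0 else 0
--
--     def build(row):
--         cells = row[start_col:end_col]
--         pad = max(size - len(cells), 0)
--         return cells + ['#'] * pad if start_col == 0 else ['#'] * pad + cells
--
--     return [build(maze[start_row + r - pad_top])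
--             if pad_top <= r < pad_top + nrows
--             else ['#'] * max(size, len(maze[start_row][start_col:end_col]))
--             for r in range(out_rows)]
-- ===== Notes on version B (the rewrite author's own statement) =====
-- stated objective: alternative
-- what changed: replaces A's slice-then-two-phase-mutation (while-loops that insert/append whole '#' rows into the sliced grid and then insert/append '#' cells one at a time into each row) with closed-form pad counts and a single comprehension over output row indices that builds each data row or wall row directly, with no intermediate list mutation
-- outside the precondition, e.g. on extract_view([['a'], ['b'], ['c']], (-3, 0), 1): A returns [['a']], B returns [['#']]
import Mathlib
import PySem

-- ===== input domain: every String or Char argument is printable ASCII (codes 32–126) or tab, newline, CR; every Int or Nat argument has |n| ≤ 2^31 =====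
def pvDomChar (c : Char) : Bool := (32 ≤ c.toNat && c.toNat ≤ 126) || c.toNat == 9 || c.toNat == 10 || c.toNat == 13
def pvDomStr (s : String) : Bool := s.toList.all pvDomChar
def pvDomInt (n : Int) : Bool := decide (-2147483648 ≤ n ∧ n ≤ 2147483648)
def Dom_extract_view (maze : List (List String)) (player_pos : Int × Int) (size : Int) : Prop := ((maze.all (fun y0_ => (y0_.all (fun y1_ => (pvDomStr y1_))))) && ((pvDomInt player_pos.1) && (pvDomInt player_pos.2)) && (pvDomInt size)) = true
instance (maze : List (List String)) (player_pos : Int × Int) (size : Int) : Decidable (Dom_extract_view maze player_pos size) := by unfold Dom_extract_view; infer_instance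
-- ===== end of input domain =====

-- B replaces A's slice-then-mutating-pad loops by closed-form pad offsets and one
-- nested comprehension over the output indices (alternative decomposition, same cost).

-- ===== PORT A =====
-- 'while len(sliced_view) < size: append/insert a wall row' (['#'] * len(sliced_view[0]))
def padRowsA (startRow size : Int) (sv : List (List String)) : List (List String) :=
  if (sv.length : Int) < size then
    if startRow == 0 then
      padRowsA startRow size (sv ++ [List.replicate (PySem.List.pyGetD sv 0 ([] : List String)).length "#"])
    else
      padRowsA startRow size (List.replicate (PySem.List.pyGetD sv 0 ([] : List String)).length "#" :: sv)
  else sv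
termination_by (size - sv.length).toNat
decreasing_by
  · simp; omega
  · simp; omega

-- 'while len(row) < size: append/insert "#"'
def padColsA (startCol size : Int) (row : List String) : List String :=
  if (row.length : Int) < size then
    if startCol == 0 then padColsA startCol size (row ++ ["#"])
    else padColsA startCol size ("#" :: row)
  else row
termination_by (size - row.length).toNat
decreasing_by
  · simp; omega
  · simp; omega

def extract_view (maze : List (List String)) (player_pos : Int × Int) (size : Int) : List (List String) :=
  let view_range := PySem.Int.floordiv size 2
  let player_row := player_pos.1
  let player_col := player_pos.2
  let maze_height : Int := maze.length
  let maze_width : Int := (PySem.List.pyGetD maze 0 ([] : List String)).length  -- maze[0] (total guard; Pre_ gives maze ≠ [])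
  let start_row := max (player_row - view_range) 0
  let end_row := min (player_row + view_range) (maze_height - 1) + 1
  let start_col := max (player_col - view_range) 0
  let end_col := min (player_col + view_range) (maze_width - 1) + 1
  let sliced_view := (PySem.List.slice maze (some start_row) (some end_row)).map
      (fun row => PySem.List.slice row (some start_col) (some end_col))
  (padRowsA start_row size sliced_view).map (padColsA start_col size)

-- ===== PORT B =====
def extract_view_alt (maze : List (List String)) (player_pos : Int × Int) (size : Int) : List (List String) :=
  let view_range := PySem.Int.floordiv size 2
  let player_row := player_pos.1
  let player_col := player_pos.2
  let maze_height : Int := maze.length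
  let maze_width : Int := (PySem.List.pyGetD maze 0 ([] : List String)).length  -- maze[0] (total guard; Pre_ gives maze ≠ [])
  let start_row := max (player_row - view_range) 0
  let end_row := min (player_row + view_range) (maze_height - 1) + 1
  let start_col := max (player_col - view_range) 0
  let end_col := min (player_col + view_range) (maze_width - 1) + 1
  let nrows := end_row - start_row
  let out_rows := max nrows size
  let pad_top := if start_row ≠ 0 then out_rows - nrows else 0
  let build : List String → List String := fun row =>
    let cells := PySem.List.slice row (some start_col) (some end_col)
    let pad := max (size - (cells.length : Int)) 0
    if start_col == 0 then cells ++ List.replicate pad.toNat "#"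
    else List.replicate pad.toNat "#" ++ cells
  (PySem.List.pyRange 0 out_rows 1).map (fun r =>
    if pad_top ≤ r ∧ r < pad_top + nrows then
      build (PySem.List.pyGetD maze (start_row + r - pad_top) ([] : List String))
    else
      List.replicate (max size ((PySem.List.slice (PySem.List.pyGetD maze start_row ([] : List String)) (some start_col) (some end_col)).length : Int)).toNat "#")

-- ===== PRECONDITION & SPEC =====
-- Pre_ excludes the inputs on which A raises (an empty maze, or an empty view slice with
-- size > 0), and players so far above the maze that the row slice bound goes negative and
-- A returns Python-wraparound row fragments — a corner no caller of a view extraction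
-- would specify; B shows only walls there.
def Pre_extract_view (maze : List (List String)) (player_pos : Int × Int) (size : Int) : Prop :=
  let view_range := PySem.Int.floordiv size 2
  let start_row := max (player_pos.1 - view_range) 0
  let end_row := min (player_pos.1 + view_range) ((maze.length : Int) - 1) + 1
  maze ≠ [] ∧
    ((0 ≤ end_row ∧ (start_row < end_row ∨ size ≤ 0)) ∨
      (size ≤ 0 ∧ (maze.length : Int) + end_row ≤ start_row))
instance (maze : List (List String)) (player_pos : Int × Int) (size : Int) : Decidable (Pre_extract_view maze player_pos size) := by unfold Pre_extract_view; infer_instance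

def pvWitness_extract_view : List (List String) × (Int × Int) × Int :=
  ([["a", "b"], ["c", "d"]], (0, 0), 2)

def Spec_extract_view (maze : List (List String)) (player_pos : Int × Int) (size : Int) (out : List (List String)) : Prop := out = extract_view_alt maze player_pos size
instance (maze : List (List String)) (player_pos : Int × Int) (size : Int) (out : List (List String)) : Decidable (Spec_extract_view maze player_pos size out) := by unfold Spec_extract_view; infer_instance

-- ===== CLAIM (what is proved, stated in full; the proofs are below) =====
def Claim_equal_extract_view : Prop := ∀ (maze : List (List String)) (player_pos : Int × Int) (size : Int), Dom_extract_view maze player_pos size → Pre_extract_view maze player_pos size → Spec_extract_view maze player_pos size (extract_view maze player_pos size)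


-- ===== LEMMAS AND PROOFS =====

-- closed form of A's column-padding while-loop
theorem padColsA_eq (startCol size : Int) (row : List String) :
    padColsA startCol size row =
      if startCol = 0 then row ++ List.replicate (size - row.length).toNat "#"
      else List.replicate (size - row.length).toNat "#" ++ row := by
  fun_induction padColsA startCol size row with
  | case1 row hlt heq ih =>
      simp only [beq_iff_eq] at heq
      subst heq
      rw [ih]
      have : (size - (row.length : Int)).toNat = (size - ((row ++ ["#"]).length : Int)).toNat + 1 := by
        simp; omega
      rw [this, List.replicate_succ', List.append_assoc]
      simp
      rw [← List.replicate_succ, List.replicate_succ']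
  | case2 row hlt heq ih =>
      rw [ih]
      have hne : startCol ≠ 0 := by simpa using heq
      simp only [if_neg hne]
      have : (size - (row.length : Int)).toNat = (size - ((("#" :: row) : List String).length : Int)).toNat + 1 := by
        simp; omega
      rw [this, List.replicate_succ']
      simp
  | case3 row hlt =>
      have : (size - (row.length : Int)).toNat = 0 := by omega
      rw [this]
      split <;> simp

-- closed form of A's row-padding while-loop
theorem padRowsA_eq (startRow size : Int) (sv : List (List String)) :
    padRowsA startRow size sv =
      if startRow = 0 then
        sv ++ List.replicate (size - sv.length).toNat (List.replicate (PySem.List.pyGetD sv 0 ([] : List String)).length "#")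
      else
        List.replicate (size - sv.length).toNat (List.replicate (PySem.List.pyGetD sv 0 ([] : List String)).length "#") ++ sv := by
  fun_induction padRowsA startRow size sv with
  | case1 sv hlt heq ih =>
      simp only [beq_iff_eq] at heq
      subst heq
      rw [ih]
      have hh : (PySem.List.pyGetD (sv ++ [List.replicate (PySem.List.pyGetD sv 0 ([] : List String)).length "#"]) 0 ([] : List String)).length
          = (PySem.List.pyGetD sv 0 ([] : List String)).length := by
        cases sv with
        | nil => simp [PySem.List.pyGetD]
        | cons x xs => simp [PySem.List.pyGetD_zero_cons]
      rw [hh]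
      have hc : (size - (sv.length : Int)).toNat
          = (size - ((sv ++ [List.replicate (PySem.List.pyGetD sv 0 ([] : List String)).length "#"]).length : Int)).toNat + 1 := by
        simp; omega
      rw [hc, List.replicate_succ', List.append_assoc]
      simp
      rw [← List.replicate_succ, List.replicate_succ']
  | case2 sv hlt heq ih =>
      rw [ih]
      have hh : (PySem.List.pyGetD (List.replicate (PySem.List.pyGetD sv 0 ([] : List String)).length "#" :: sv) 0 ([] : List String)).length
          = (PySem.List.pyGetD sv 0 ([] : List String)).length := by
        rw [PySem.List.pyGetD_zero_cons]
        simp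
      rw [hh]
      have hne : startRow ≠ 0 := by simpa using heq
      simp only [if_neg hne]
      have hc : (size - (sv.length : Int)).toNat
          = (size - (((List.replicate (PySem.List.pyGetD sv 0 ([] : List String)).length "#" :: sv)).length : Int)).toNat + 1 := by
        simp; omega
      rw [hc, List.replicate_succ']
      simp
  | case3 sv hlt =>
      have : (size - (sv.length : Int)).toNat = 0 := by omega
      rw [this]
      split <;> simp

-- '[xs[a+k] for k in range(n)]' is the slice xs[a:a+n]
theorem range_map_getD {α : Type} (xs : List α) (d : α) (a n : Nat) (h : a + n ≤ xs.length) :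
    (List.range n).map (fun k => xs.getD (a + k) d) = (xs.drop a).take n := by
  apply List.ext_getElem
  · simp; omega
  · intro i h1 h2
    simp only [List.getElem_map, List.getElem_range, List.getElem_take, List.getElem_drop]
    rw [List.getD_eq_getElem xs d (by simp at h1 ⊢; omega)]

-- a comprehension whose body is constant on the range is a replicate
theorem pyRange_map_const {α : Type} (a b : Int) (f : Int → α) (pad : α)
    (h : ∀ c : Int, a ≤ c → c < b → f c = pad) :
    (PySem.List.pyRange a b 1).map f = List.replicate (b - a).toNat pad := by
  rw [List.map_congr_left (g := fun _ => pad) (fun c hc => by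
    have := PySem.List.mem_pyRange_one.mp hc
    exact h c this.1 this.2)]
  rw [List.map_const', PySem.List.length_pyRange_one]

-- split a comprehension over range(0, out) at p and p + n
theorem pyRange_map_split {α : Type} (out p n : Int) (F : Int → α)
    (h0 : 0 ≤ p) (hn : 0 ≤ n) (h1 : p + n ≤ out) :
    (PySem.List.pyRange 0 out 1).map F =
      (PySem.List.pyRange 0 p 1).map F
        ++ (List.range n.toNat).map (fun k : Nat => F (p + (k : Int)))
        ++ (PySem.List.pyRange (p + n) out 1).map F := by
  rw [PySem.List.pyRange_one_append 0 p out h0 (by omega),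
      PySem.List.pyRange_one_append p (p + n) out (by omega) h1]
  simp only [List.map_append, List.append_assoc]
  congr 2
  rw [PySem.List.pyRange_one p (p + n), List.map_map]
  have : ((p + n) - p).toNat = n.toNat := by omega
  rw [this]
  simp [Function.comp]

-- B's closed-form one-sided padding of a row is A's column-padding loop
theorem build_eq (sc size : Int) (cells : List String) :
    (if sc == 0 then cells ++ List.replicate (max (size - (cells.length : Int)) 0).toNat "#"
     else List.replicate (max (size - (cells.length : Int)) 0).toNat "#" ++ cells)
    = padColsA sc size cells := by
  rw [padColsA_eq]
  have h : (max (size - (cells.length : Int)) 0).toNat = (size - (cells.length : Int)).toNat := by omega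
  rw [h]
  rcases eq_or_ne sc 0 with h0 | h0 <;> simp [h0]

-- A's column-padding of an all-'#' row is a full wall row
theorem padColsA_wall (sc size : Int) (m : Nat) :
    padColsA sc size (List.replicate m "#") = List.replicate (max size (m : Int)).toNat "#" := by
  rw [padColsA_eq]
  split
  · rw [← List.replicate_add]
    congr 1
    simp
    omega
  · rw [← List.replicate_add]
    congr 1
    simp
    omega

-- the heart of the proof: with abstract in-range bounds, A's slice-then-pad equals B's comprehension
theorem core (maze : List (List String)) (size sr er sc ec : Int)
    (hsr0 : 0 ≤ sr) (her0 : 0 ≤ er) (herH : er ≤ (maze.length : Int))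
    (hmain : sr < er ∨ size ≤ 0) :
    (padRowsA sr size ((PySem.List.slice maze (some sr) (some er)).map
        (fun row => PySem.List.slice row (some sc) (some ec)))).map (padColsA sc size)
    = (PySem.List.pyRange 0 (max (er - sr) size) 1).map (fun r =>
        if (if sr ≠ 0 then max (er - sr) size - (er - sr) else 0) ≤ r ∧
            r < (if sr ≠ 0 then max (er - sr) size - (er - sr) else 0) + (er - sr) then
          (fun row =>
            (fun cells =>
              if sc == 0 then cells ++ List.replicate (max (size - (cells.length : Int)) 0).toNat "#"
              else List.replicate (max (size - (cells.length : Int)) 0).toNat "#" ++ cells)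
            (PySem.List.slice row (some sc) (some ec)))
          (PySem.List.pyGetD maze (sr + r - (if sr ≠ 0 then max (er - sr) size - (er - sr) else 0)) ([] : List String))
        else
          List.replicate (max size ((PySem.List.slice (PySem.List.pyGetD maze sr ([] : List String)) (some sc) (some ec)).length : Int)).toNat "#") := by
  set nr := er - sr with hnr
  set outR := max nr size with houtR
  set pT := (if sr ≠ 0 then outR - nr else 0) with hpT
  by_cases hsr : sr < er
  · -- non-empty vertical window
    have hpT0 : 0 ≤ pT := by rcases eq_or_ne sr 0 with h | h <;> simp [h] at hpT <;> omega
    have hpTn : pT + nr ≤ outR := by rcases eq_or_ne sr 0 with h | h <;> simp [h] at hpT <;> omega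
    have hanrN : sr.toNat + (er.toNat - sr.toNat) ≤ maze.length := by omega
    have hmslice : PySem.List.slice maze (some sr) (some er)
        = (List.range (er.toNat - sr.toNat)).map (fun k => maze.getD (sr.toNat + k) ([] : List String)) := by
      rw [PySem.List.slice_toNat maze hsr0 her0, range_map_getD maze ([] : List String) sr.toNat (er.toNat - sr.toNat) hanrN]
    rw [hmslice, List.map_map]
    have hsrget : PySem.List.pyGetD maze sr ([] : List String) = maze.getD sr.toNat ([] : List String) := by
      rw [PySem.List.pyGetD_eq_getElem (xs := maze) (d := ([] : List String)) hsr0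
        (by simpa using (by omega : sr < (maze.length : Int)))]
      rw [List.getD_eq_getElem maze _ (by omega)]
    have hhead : PySem.List.pyGetD ((List.range (er.toNat - sr.toNat)).map
          ((fun row => PySem.List.slice row (some sc) (some ec)) ∘ fun k => maze.getD (sr.toNat + k) ([] : List String))) 0 ([] : List String)
        = PySem.List.slice (maze.getD sr.toNat ([] : List String)) (some sc) (some ec) := by
      rw [PySem.List.pyGetD_zero]
      rw [List.getD_eq_getElem _ _ (by simp; omega)]
      simp
    rw [padRowsA_eq, hhead]
    -- B side: split the row range
    rw [pyRange_map_split outR pT nr _ hpT0 (by omega) hpTn]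
    set wall := List.replicate (max size (((PySem.List.slice (PySem.List.pyGetD maze sr ([] : List String)) (some sc) (some ec)).length : Nat) : Int)).toNat "#" with hwall
    have hBseg1 : (PySem.List.pyRange 0 pT 1).map (fun r =>
        if pT ≤ r ∧ r < pT + nr then
          (fun row =>
            (fun cells =>
              if sc == 0 then cells ++ List.replicate (max (size - (cells.length : Int)) 0).toNat "#"
              else List.replicate (max (size - (cells.length : Int)) 0).toNat "#" ++ cells)
            (PySem.List.slice row (some sc) (some ec)))
          (PySem.List.pyGetD maze (sr + r - pT) ([] : List String))
        else wall)
        = List.replicate pT.toNat wall := by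
      rw [pyRange_map_const 0 pT _ _ (fun r h1 h2 => by rw [if_neg (by omega)])]
      simp
    have hBseg3 : (PySem.List.pyRange (pT + nr) outR 1).map (fun r =>
        if pT ≤ r ∧ r < pT + nr then
          (fun row =>
            (fun cells =>
              if sc == 0 then cells ++ List.replicate (max (size - (cells.length : Int)) 0).toNat "#"
              else List.replicate (max (size - (cells.length : Int)) 0).toNat "#" ++ cells)
            (PySem.List.slice row (some sc) (some ec)))
          (PySem.List.pyGetD maze (sr + r - pT) ([] : List String))
        else wall)
        = List.replicate (outR - (pT + nr)).toNat wall := by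
      rw [pyRange_map_const (pT + nr) outR _ _ (fun r h1 h2 => by rw [if_neg (by omega)])]
    have hBseg2 : (List.range nr.toNat).map (fun k : Nat =>
        (fun r =>
          if pT ≤ r ∧ r < pT + nr then
            (fun row =>
              (fun cells =>
                if sc == 0 then cells ++ List.replicate (max (size - (cells.length : Int)) 0).toNat "#"
                else List.replicate (max (size - (cells.length : Int)) 0).toNat "#" ++ cells)
              (PySem.List.slice row (some sc) (some ec)))
            (PySem.List.pyGetD maze (sr + r - pT) ([] : List String))
          else wall) (pT + (k : Int)))
        = (List.range (er.toNat - sr.toNat)).map (fun k =>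
            padColsA sc size (PySem.List.slice (maze.getD (sr.toNat + k) ([] : List String)) (some sc) (some ec))) := by
      have hnrN : nr.toNat = er.toNat - sr.toNat := by omega
      rw [hnrN]
      apply List.map_congr_left
      intro k hk
      have hklt : k < er.toNat - sr.toNat := List.mem_range.mp hk
      simp only
      rw [if_pos ⟨by omega, by omega⟩]
      have hidx : sr + (pT + (k : Int)) - pT = ((sr.toNat + k : Nat) : Int) := by push_cast; omega
      rw [hidx, PySem.List.pyGetD_natCast]
      exact build_eq sc size _
    rw [hBseg1, hBseg3, hBseg2]
    -- assemble
    rcases eq_or_ne sr 0 with h | h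
    · have hpT' : pT = 0 := by rw [hpT, if_neg (fun hh => hh h)]
      rw [if_pos h, List.map_append, List.map_replicate, padColsA_wall, List.map_map, hpT']
      simp only [Int.toNat_zero, List.replicate_zero, List.nil_append]
      congr 1
      rw [hwall, hsrget]
      congr 1
      simp
      omega
    · have hpT' : pT = outR - nr := by rw [hpT, if_pos h]
      rw [if_neg h, List.map_append, List.map_replicate, padColsA_wall, List.map_map]
      have h3 : (outR - (pT + nr)).toNat = 0 := by omega
      rw [h3]
      simp only [List.replicate_zero, List.append_nil]
      congr 1
      rw [hwall, hsrget]
      congr 1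
      simp
      omega
  · -- empty vertical window: size ≤ 0, both sides are []
    have hsz : size ≤ 0 := by omega
    have hz : er.toNat - sr.toNat = 0 := by omega
    rw [PySem.List.slice_toNat maze hsr0 her0, hz]
    simp only [List.take_zero, List.map_nil]
    rw [padRowsA_eq]
    have hzc : (size - (([] : List (List String)).length : Int)).toNat = 0 := by simp; omega
    rw [hzc]
    simp only [List.replicate_zero, List.append_nil, ite_self, List.map_nil]
    rw [PySem.List.pyRange_one_eq_nil (show outR ≤ (0 : Int) by omega)]
    simp

-- wrapped-empty window: the row slice is empty and size ≤ 0, so both sides are []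
theorem core2 (maze : List (List String)) (size sr er sc ec : Int)
    (hsr0 : 0 ≤ sr) (hsz : size ≤ 0) (hwrap : (maze.length : Int) + er ≤ sr) :
    (padRowsA sr size ((PySem.List.slice maze (some sr) (some er)).map
        (fun row => PySem.List.slice row (some sc) (some ec)))).map (padColsA sc size)
    = (PySem.List.pyRange 0 (max (er - sr) size) 1).map (fun r =>
        if (if sr ≠ 0 then max (er - sr) size - (er - sr) else 0) ≤ r ∧
            r < (if sr ≠ 0 then max (er - sr) size - (er - sr) else 0) + (er - sr) then
          (fun row =>
            (fun cells =>
              if sc == 0 then cells ++ List.replicate (max (size - (cells.length : Int)) 0).toNat "#"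
              else List.replicate (max (size - (cells.length : Int)) 0).toNat "#" ++ cells)
            (PySem.List.slice row (some sc) (some ec)))
          (PySem.List.pyGetD maze (sr + r - (if sr ≠ 0 then max (er - sr) size - (er - sr) else 0)) ([] : List String))
        else
          List.replicate (max size ((PySem.List.slice (PySem.List.pyGetD maze sr ([] : List String)) (some sc) (some ec)).length : Int)).toNat "#") := by
  have hempty : PySem.List.slice maze (some sr) (some er) = [] := by
    apply List.eq_nil_of_length_eq_zero
    rw [PySem.List.length_slice]
    simp [PySem.List.clampIdx]
    split_ifs <;> omega
  rw [hempty]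
  simp only [List.map_nil]
  rw [padRowsA_eq]
  have hzc : (size - (([] : List (List String)).length : Int)).toNat = 0 := by simp; omega
  rw [hzc]
  simp only [List.replicate_zero, List.append_nil, ite_self, List.map_nil]
  rw [PySem.List.pyRange_one_eq_nil (show max (er - sr) size ≤ (0 : Int) by omega)]
  simp

theorem main_eq (maze : List (List String)) (player_pos : Int × Int) (size : Int)
    (hpre : Pre_extract_view maze player_pos size) :
    extract_view maze player_pos size = extract_view_alt maze player_pos size := by
  obtain ⟨hne, hcase⟩ := hpre
  unfold extract_view extract_view_alt
  dsimp only
  rcases hcase with ⟨her0, hmain⟩ | ⟨hsz, hwrap⟩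
  · exact core maze size _ _ _ _ (le_max_right _ _) her0 (by omega) (by omega)
  · exact core2 maze size _ _ _ _ (le_max_right _ _) hsz (by omega)

-- ===== VERDICT (by name: the statement is the Claim_ definition above) =====
theorem extract_view_spec : Claim_equal_extract_view := by
  intro maze player_pos size _hdom hpre
  exact main_eq maze player_pos size hpre
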